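-- pv_equiv track=rewrite | github.com/PolinaNik/MULTI_ARINC | modules.py | desw2
-- ===== SOURCE A (Python) =====
-- def desw2(list1, list2):
--     for i in range(len(list1)):
--         line = list1[i]
--         route = line[0]
--         point = line[1]
--         ind = line[2]
--         for w in range(len(list2)):
--             line2 = list2[w]
--             name = line2[0]
--             ind2 = line2[1]
--             if point == name and ind == ind2:
--                 yield route, point, line2[2], line2[3], line[3], line[4]
-- ===== SOURCE B (Python) =====
-- def desw2(list1, list2):
--     index = {}
--     for line2 in list2:
--         index.setdefault(tuple(line2[:2]), []).append(line2)
--     for line in list1: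
--         for line2 in index.get((line[1], line[2]), []):
--             yield line[0], line[1], line2[2], line2[3], line[3], line[4]
-- ===== Notes on version B (the rewrite author's own statement) =====
-- stated objective: faster
-- what changed: B replaces the nested scan of list2 per list1 row by a one-pass dict index keyed by tuple(line2[:2]) mapping to the rows of list2 in order, then a single lookup per list1 row.
import Mathlib
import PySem

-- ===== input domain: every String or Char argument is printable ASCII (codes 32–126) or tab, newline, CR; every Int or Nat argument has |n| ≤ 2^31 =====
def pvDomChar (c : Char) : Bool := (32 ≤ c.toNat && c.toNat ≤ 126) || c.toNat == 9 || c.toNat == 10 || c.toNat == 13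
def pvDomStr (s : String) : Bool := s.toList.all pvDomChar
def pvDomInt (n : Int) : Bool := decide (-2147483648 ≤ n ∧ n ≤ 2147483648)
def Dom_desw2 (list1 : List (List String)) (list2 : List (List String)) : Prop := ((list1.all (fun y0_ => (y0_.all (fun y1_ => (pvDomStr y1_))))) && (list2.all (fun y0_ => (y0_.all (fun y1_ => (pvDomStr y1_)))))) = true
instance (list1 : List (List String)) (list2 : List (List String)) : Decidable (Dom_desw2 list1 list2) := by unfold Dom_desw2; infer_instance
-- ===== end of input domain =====

-- B replaces A's nested scan (list2 rescanned per list1 row) by a one-pass dict index keyed by tuple(line2[:2]) plus a single lookup per list1 row.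


-- ===== PORT A =====
-- literal port of A's nested loops; indexing uses pyGet? with a "" default that
-- is never hit inside Pre_desw2 (outside Pre_ the Python raises IndexError)
def desw2 (list1 : List (List String)) (list2 : List (List String)) : List (List String) :=
  list1.foldl (fun acc line =>
    let route := (PySem.List.pyGet? line 0).getD ""
    let point := (PySem.List.pyGet? line 1).getD ""
    let ind   := (PySem.List.pyGet? line 2).getD ""
    list2.foldl (fun acc2 line2 =>
      let name := (PySem.List.pyGet? line2 0).getD ""
      let ind2 := (PySem.List.pyGet? line2 1).getD ""
      if point == name && ind == ind2 then
        acc2 ++ [[route, point, (PySem.List.pyGet? line2 2).getD "", (PySem.List.pyGet? line2 3).getD "",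
                  (PySem.List.pyGet? line 3).getD "", (PySem.List.pyGet? line 4).getD ""]]
      else acc2) acc) []

-- ===== PORT B =====
-- B: index.setdefault(tuple(line2[:2]), []).append(line2)  =  Dict.modify (slice line2 [:2]) [] (· ++ [line2])
def desw2_altIndex (list2 : List (List String)) : PySem.Dict (List String) (List (List String)) :=
  list2.foldl (fun d line2 =>
    d.modify (PySem.List.slice line2 none (some 2)) [] (· ++ [line2]))
    PySem.Dict.empty

def desw2_alt (list1 : List (List String)) (list2 : List (List String)) : List (List String) :=
  let index := desw2_altIndex list2
  list1.foldl (fun acc line =>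
    acc ++ (index.getD [(PySem.List.pyGet? line 1).getD "", (PySem.List.pyGet? line 2).getD ""] []).map
      (fun line2 =>
        [(PySem.List.pyGet? line 0).getD "", (PySem.List.pyGet? line 1).getD "",
         (PySem.List.pyGet? line2 2).getD "", (PySem.List.pyGet? line2 3).getD "",
         (PySem.List.pyGet? line 3).getD "", (PySem.List.pyGet? line 4).getD ""])) []

-- ===== PRECONDITION & SPEC =====
-- Pre_ excludes exactly the inputs on which A raises IndexError: a list1 row shorter than 3,
-- a list2 row shorter than 2 while list1 is nonempty (the inner loop indexes every list2 row),
-- or a matched pair whose rows are shorter than the 5/4 fields the yield reads.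
def Pre_desw2 (list1 : List (List String)) (list2 : List (List String)) : Prop :=
  (∀ r ∈ list1, 3 ≤ r.length) ∧ (list1 ≠ [] → ∀ s ∈ list2, 2 ≤ s.length) ∧
  (∀ r ∈ list1, ∀ s ∈ list2,
    (PySem.List.pyGet? r 1 = PySem.List.pyGet? s 0 ∧ PySem.List.pyGet? r 2 = PySem.List.pyGet? s 1) →
    5 ≤ r.length ∧ 4 ≤ s.length)
instance (list1 : List (List String)) (list2 : List (List String)) : Decidable (Pre_desw2 list1 list2) := by
  unfold Pre_desw2; infer_instance

def pvWitness_desw2 : List (List String) × List (List String) :=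
  ([["r", "p", "i", "c", "d"]], [["p", "i", "u", "v"], ["q", "i", "u", "v"]])

def Spec_desw2 (list1 : List (List String)) (list2 : List (List String)) (out : List (List String)) : Prop := out = desw2_alt list1 list2
instance (list1 : List (List String)) (list2 : List (List String)) (out : List (List String)) : Decidable (Spec_desw2 list1 list2 out) := by unfold Spec_desw2; infer_instance

-- ===== CLAIM (what is proved, stated in full; the proofs are below) =====
def Claim_equal_desw2 : Prop := ∀ (list1 : List (List String)) (list2 : List (List String)), Dom_desw2 list1 list2 → Pre_desw2 list1 list2 → Spec_desw2 list1 list2 (desw2 list1 list2)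

-- ===== LEMMAS AND PROOFS =====

-- A's inner loop over list2 appends exactly the rows matching its boolean test, mapped
theorem inner_eq (point ind : String) (f : List String → List String) :
    ∀ (l2 : List (List String)) (acc : List (List String)),
    l2.foldl (fun acc2 line2 =>
      if point == (PySem.List.pyGet? line2 0).getD "" && ind == (PySem.List.pyGet? line2 1).getD "" then
        acc2 ++ [f line2] else acc2) acc
    = acc ++ (l2.filter (fun s =>
        point == (PySem.List.pyGet? s 0).getD "" && ind == (PySem.List.pyGet? s 1).getD "")).map f := by
  intro l2
  induction l2 with
  | nil => intro acc; simp
  | cons s t ih =>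
    intro acc
    by_cases h : (point == (PySem.List.pyGet? s 0).getD "" && ind == (PySem.List.pyGet? s 1).getD "") = true
    · simp only [List.foldl_cons, List.filter_cons, h, if_true]
      rw [ih]; simp
    · have h' : (point == (PySem.List.pyGet? s 0).getD "" && ind == (PySem.List.pyGet? s 1).getD "") = false :=
        Bool.not_eq_true _ ▸ eq_false_of_ne_true h
      simp only [List.foldl_cons, List.filter_cons, h', if_false, Bool.false_eq_true]
      exact ih acc

-- B's index groups list2 by its slice key, preserving order within each key
theorem index_getD (list2 : List (List String)) (k : List String) :
    (desw2_altIndex list2).getD k []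
      = list2.filter (fun s => PySem.List.slice s none (some 2) == k) := by
  have h : desw2_altIndex list2
      = (list2.map (fun s => (PySem.List.slice s none (some 2), s))).foldl
          (fun d p => d.modify p.1 [] (· ++ [p.2])) PySem.Dict.empty := by
    simp [desw2_altIndex, List.foldl_map]
  rw [h, PySem.Dict.getD_foldl_modify_append]
  simp [List.filter_map, Function.comp_def]

-- on rows of length ≥ 2 the slice key test coincides with A's boolean test
theorem key_eq (point ind : String) (s : List String) (hs : 2 ≤ s.length) :
    (PySem.List.slice s none (some 2) == [point, ind])
      = (point == (PySem.List.pyGet? s 0).getD "" && ind == (PySem.List.pyGet? s 1).getD "") := by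
  match s, hs with
  | a :: b :: t, _ =>
    have : PySem.List.slice (a :: b :: t) none (some 2) = [a, b] := by
      rw [PySem.List.slice_to _ (by norm_num)]; rfl
    have ha : (PySem.List.pyGet? (a :: b :: t) 0).getD "" = a := by
      rw [PySem.List.pyGet?_zero]; rfl
    have hb : (PySem.List.pyGet? (a :: b :: t) 1).getD "" = b := by
      rw [show (1:Int) = ((0:Nat):Int)+1 by norm_num, PySem.List.pyGet?_cons_succ,
        PySem.List.pyGet?_natCast]; rfl
    rw [this, ha, hb, Bool.eq_iff_iff]
    simp only [beq_iff_eq, Bool.and_eq_true, List.cons.injEq, and_true]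
    constructor
    · rintro ⟨x, y⟩; exact ⟨x.symm, y.symm⟩
    · rintro ⟨x, y⟩; exact ⟨x.symm, y.symm⟩

theorem both_eq (list1 list2 : List (List String))
    (h2 : list1 ≠ [] → ∀ s ∈ list2, 2 ≤ s.length) :
    desw2 list1 list2 = desw2_alt list1 list2 := by
  cases hl : list1 with
  | nil => simp [desw2, desw2_alt]
  | cons x xs =>
    have h2' : ∀ s ∈ list2, 2 ≤ s.length := h2 (by simp [hl])
    rw [← hl]
    unfold desw2 desw2_alt
    refine List.foldl_ext _ _ _ (fun acc line _ => ?_)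
    rw [index_getD, inner_eq]
    congr 1
    congr 1
    exact List.filter_congr (fun s hs => (key_eq _ _ s (h2' s hs)).symm)

-- ===== VERDICT (by name: the statement is the Claim_ definition above) =====
theorem desw2_spec : Claim_equal_desw2 :=
  fun list1 list2 _ hpre => (both_eq list1 list2 hpre.2.1).symm ▸ rfl
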